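-- pv_equiv track=rewrite | github.com/Just9120/smart-life-bot | src/smart_life_bot/bot/telegram_transport.py | _build_month_grid_rows
-- ===== SOURCE A (Python) =====
-- CALLBACK_CALENDAR_DATE_MONTH_PREFIX = "calendar:date:month:"
--
-- CALLBACK_CALENDAR_DATE_SELECT_PREFIX = "calendar:date:select:"
--
-- CALLBACK_CALENDAR_DATE_CANCEL = "calendar:date:cancel"
--
-- CALLBACK_CALENDAR_DATE_NOOP_PREFIX = "calendar:date:noop:"
--
-- def _build_month_grid_rows(year_month: tuple[int, int], token: str) -> tuple[tuple[tuple[str, str], ...], ...]: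
--     import calendar
--     year, month = year_month
--     cal = calendar.Calendar(firstweekday=0)
--     month_label = f"{year:04d}-{month:02d}"
--     prev_y, prev_m = (year - 1, 12) if month == 1 else (year, month - 1)
--     next_y, next_m = (year + 1, 1) if month == 12 else (year, month + 1)
--     rows: list[tuple[tuple[str, str], ...]] = [(
--         ("⬅️", f"{CALLBACK_CALENDAR_DATE_MONTH_PREFIX}{token}:{prev_y:04d}-{prev_m:02d}"),
--         (month_label, f"{CALLBACK_CALENDAR_DATE_MONTH_PREFIX}{token}:{month_label}"),
--         ("➡️", f"{CALLBACK_CALENDAR_DATE_MONTH_PREFIX}{token}:{next_y:04d}-{next_m:02d}"),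
--     )]
--     for week in cal.monthdayscalendar(year, month):
--         week_row: list[tuple[str, str]] = []
--         for day in week:
--             if day == 0:
--                 week_row.append(("·", f"{CALLBACK_CALENDAR_DATE_NOOP_PREFIX}{token}:{month_label}"))
--                 continue
--             iso = f"{year:04d}-{month:02d}-{day:02d}"
--             week_row.append((str(day), f"{CALLBACK_CALENDAR_DATE_SELECT_PREFIX}{token}:{iso}"))
--         rows.append(tuple(week_row))
--     rows.append((("↩️ Отмена", CALLBACK_CALENDAR_DATE_CANCEL),))
--     return tuple(rows)
-- ===== SOURCE B (Python) =====
-- CALLBACK_CALENDAR_DATE_MONTH_PREFIX = "calendar:date:month:"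
-- CALLBACK_CALENDAR_DATE_SELECT_PREFIX = "calendar:date:select:"
-- CALLBACK_CALENDAR_DATE_CANCEL = "calendar:date:cancel"
-- CALLBACK_CALENDAR_DATE_NOOP_PREFIX = "calendar:date:noop:"
--
--
-- def _build_month_grid_rows(year_month: tuple[int, int], token: str) -> tuple[tuple[tuple[str, str], ...], ...]:
--     import calendar
--     year, month = year_month
--     first, ndays = calendar.monthrange(year, month)
--     month_label = f"{year:04d}-{month:02d}"
--     prev_y, prev_m = (year - 1, 12) if month == 1 else (year, month - 1)
--     next_y, next_m = (year + 1, 1) if month == 12 else (year, month + 1)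
--     noop = ("·", f"{CALLBACK_CALENDAR_DATE_NOOP_PREFIX}{token}:{month_label}")
--     rows = [(
--         ("⬅️", f"{CALLBACK_CALENDAR_DATE_MONTH_PREFIX}{token}:{prev_y:04d}-{prev_m:02d}"),
--         (month_label, f"{CALLBACK_CALENDAR_DATE_MONTH_PREFIX}{token}:{month_label}"),
--         ("➡️", f"{CALLBACK_CALENDAR_DATE_MONTH_PREFIX}{token}:{next_y:04d}-{next_m:02d}"),
--     )]
--     nweeks = (first + ndays + 6) // 7
--     for w in range(nweeks):
--         start = w * 7 - first + 1
--         rows.append(tuple(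
--             noop if d < 1 or d > ndays
--             else (str(d), f"{CALLBACK_CALENDAR_DATE_SELECT_PREFIX}{token}:{year:04d}-{month:02d}-{d:02d}")
--             for d in range(start, start + 7)))
--     rows.append((("↩️ Отмена", CALLBACK_CALENDAR_DATE_CANCEL),))
--     return tuple(rows)
-- ===== Notes on version B (the rewrite author's own statement) =====
-- stated objective: alternative
-- what changed: Replaces calendar.Calendar(...).monthdayscalendar's padded-flat-list-sliced-into-weeks grid by calendar.monthrange plus direct per-week arithmetic day ranges (w*7-first+1 .. w*7-first+7, out-of-range days become noop cells), so no zero-padded day matrix is built or scanned.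
import Mathlib
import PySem

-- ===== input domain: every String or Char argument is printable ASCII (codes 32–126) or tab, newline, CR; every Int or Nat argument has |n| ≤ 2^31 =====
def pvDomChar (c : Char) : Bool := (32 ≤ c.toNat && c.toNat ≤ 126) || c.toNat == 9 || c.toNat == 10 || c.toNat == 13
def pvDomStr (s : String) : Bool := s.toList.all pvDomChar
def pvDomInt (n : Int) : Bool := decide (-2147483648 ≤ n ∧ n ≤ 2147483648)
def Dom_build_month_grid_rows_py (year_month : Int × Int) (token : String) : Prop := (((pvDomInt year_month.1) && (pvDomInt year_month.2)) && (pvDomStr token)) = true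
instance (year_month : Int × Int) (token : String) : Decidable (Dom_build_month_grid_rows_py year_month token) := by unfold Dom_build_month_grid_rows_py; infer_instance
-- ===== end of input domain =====

-- B replaces calendar.monthdayscalendar's pad-and-chunk week grid by per-week arithmetic
-- day ranges (w*7-first+1 .. w*7-first+7, out-of-range ⇒ noop cell); same return value.

-- ===== PORT A =====
-- Shared ports of the stdlib pieces both Pythons call: f-string zero padding, calendar.isleap,
-- and the (weekday of day 1, number of days) data of calendar; exact for any int year
-- (calendar substitutes 2000 + year % 400 outside datetime's range) and month 1..12.
def pvFmt (w : Nat) (n : Int) : String :=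
  if n < 0 then "-" ++ String.ofList (List.replicate (w - 1 - (PySem.Int.toStr (-n)).toList.length) '0' ++ (PySem.Int.toStr (-n)).toList)
  else String.ofList (List.replicate (w - (PySem.Int.toStr n).toList.length) '0' ++ (PySem.Int.toStr n).toList)

def pvLeap (y : Int) : Bool := y % 4 == 0 && (y % 100 != 0 || y % 400 == 0)

def pvDaysBefore (m : Int) : Int :=
  if m = 1 then 0 else if m = 2 then 31 else if m = 3 then 59 else if m = 4 then 90
  else if m = 5 then 120 else if m = 6 then 151 else if m = 7 then 181 else if m = 8 then 212
  else if m = 9 then 243 else if m = 10 then 273 else if m = 11 then 304 else 334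

-- datetime.date(year, month, 1).weekday() with calendar.weekday's year substitution (Monday = 0)
def pvFirstWeekday (y m : Int) : Int :=
  let yy := if 1 ≤ y ∧ y ≤ 9999 then y else 2000 + y % 400
  let dbm := pvDaysBefore m + (if 2 < m ∧ pvLeap yy then 1 else 0)
  let o := 365 * (yy - 1) + (yy - 1) / 4 - (yy - 1) / 100 + (yy - 1) / 400 + dbm + 1
  (o + 6) % 7

def pvNDays (y m : Int) : Int :=
  if m = 2 then (if pvLeap y then 29 else 28)
  else if m = 4 ∨ m = 6 ∨ m = 9 ∨ m = 11 then 30 else 31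

-- A-side only: calendar.Calendar(0).monthdayscalendar = flat padded day list sliced into weeks of 7
def pvChunk7 : List Int → List (List Int)
  | [] => []
  | a :: b :: c :: d :: e :: f :: g :: rest => [a, b, c, d, e, f, g] :: pvChunk7 rest
  | l => [l]

def pvMonthDaysCal (y m : Int) : List (List Int) :=
  let f := pvFirstWeekday y m
  let n := pvNDays y m
  pvChunk7 (List.replicate f.toNat 0 ++ PySem.List.pyRange 1 (n + 1) 1 ++
            List.replicate ((7 - (f + n) % 7) % 7).toNat 0)

def build_month_grid_rows_py (year_month : Int × Int) (token : String) : List (List (String × String)) :=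
  let year := year_month.1
  let month := year_month.2
  let month_label := pvFmt 4 year ++ "-" ++ pvFmt 2 month
  let prev := if month = 1 then (year - 1, (12 : Int)) else (year, month - 1)
  let next := if month = 12 then (year + 1, (1 : Int)) else (year, month + 1)
  let rows0 : List (List (String × String)) := [[
    ("⬅️", "calendar:date:month:" ++ token ++ ":" ++ pvFmt 4 prev.1 ++ "-" ++ pvFmt 2 prev.2),
    (month_label, "calendar:date:month:" ++ token ++ ":" ++ month_label),
    ("➡️", "calendar:date:month:" ++ token ++ ":" ++ pvFmt 4 next.1 ++ "-" ++ pvFmt 2 next.2)]]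
  let body := (pvMonthDaysCal year month).map (fun week => week.map (fun day =>
    if day = 0 then ("·", "calendar:date:noop:" ++ token ++ ":" ++ month_label)
    else (PySem.Int.toStr day,
          "calendar:date:select:" ++ token ++ ":" ++ pvFmt 4 year ++ "-" ++ pvFmt 2 month ++ "-" ++ pvFmt 2 day)))
  rows0 ++ body ++ [[("↩️ Отмена", "calendar:date:cancel")]]

-- ===== PORT B =====
def build_month_grid_rows_py_alt (year_month : Int × Int) (token : String) : List (List (String × String)) :=
  let year := year_month.1
  let month := year_month.2
  let f := pvFirstWeekday year month
  let n := pvNDays year month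
  let month_label := pvFmt 4 year ++ "-" ++ pvFmt 2 month
  let prev := if month = 1 then (year - 1, (12 : Int)) else (year, month - 1)
  let next := if month = 12 then (year + 1, (1 : Int)) else (year, month + 1)
  let noop := ("·", "calendar:date:noop:" ++ token ++ ":" ++ month_label)
  let rows0 : List (List (String × String)) := [[
    ("⬅️", "calendar:date:month:" ++ token ++ ":" ++ pvFmt 4 prev.1 ++ "-" ++ pvFmt 2 prev.2),
    (month_label, "calendar:date:month:" ++ token ++ ":" ++ month_label),
    ("➡️", "calendar:date:month:" ++ token ++ ":" ++ pvFmt 4 next.1 ++ "-" ++ pvFmt 2 next.2)]]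
  let nweeks := PySem.Int.floordiv (f + n + 6) 7
  let body := (PySem.List.pyRange 0 nweeks 1).map (fun w =>
    (PySem.List.pyRange (w * 7 - f + 1) (w * 7 - f + 8) 1).map (fun d =>
      if d < 1 ∨ n < d then noop
      else (PySem.Int.toStr d,
            "calendar:date:select:" ++ token ++ ":" ++ pvFmt 4 year ++ "-" ++ pvFmt 2 month ++ "-" ++ pvFmt 2 d)))
  rows0 ++ body ++ [[("↩️ Отмена", "calendar:date:cancel")]]

-- ===== PRECONDITION & SPEC =====
-- Pre_ excludes months outside 1..12, on which Python's calendar raises IllegalMonthError.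
def Pre_build_month_grid_rows_py (year_month : Int × Int) (token : String) : Prop :=
  1 ≤ year_month.2 ∧ year_month.2 ≤ 12
instance (year_month : Int × Int) (token : String) : Decidable (Pre_build_month_grid_rows_py year_month token) := by unfold Pre_build_month_grid_rows_py; infer_instance

def pvWitness_build_month_grid_rows_py : (Int × Int) × String := ((2024, 2), "t")

def Spec_build_month_grid_rows_py (year_month : Int × Int) (token : String) (out : List (List (String × String))) : Prop := out = build_month_grid_rows_py_alt year_month token
instance (year_month : Int × Int) (token : String) (out : List (List (String × String))) : Decidable (Spec_build_month_grid_rows_py year_month token out) := by unfold Spec_build_month_grid_rows_py; infer_instance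

-- ===== CLAIM (what is proved, stated in full; the proofs are below) =====
def Claim_equal_build_month_grid_rows_py : Prop := ∀ (year_month : Int × Int) (token : String), Dom_build_month_grid_rows_py year_month token → Pre_build_month_grid_rows_py year_month token → Spec_build_month_grid_rows_py year_month token (build_month_grid_rows_py year_month token)

-- ===== LEMMAS AND PROOFS =====
lemma pvFirstWeekday_bounds (y m : Int) : 0 ≤ pvFirstWeekday y m ∧ pvFirstWeekday y m < 7 := by
  simp only [pvFirstWeekday]; omega

lemma pvNDays_cases (y m : Int) :
    pvNDays y m = 28 ∨ pvNDays y m = 29 ∨ pvNDays y m = 30 ∨ pvNDays y m = 31 := by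
  unfold pvNDays; split_ifs <;> simp

lemma weeks_eq {α : Type} (noop : α) (cell : Int → α) (f n : Int)
    (hf0 : 0 ≤ f) (hf7 : f < 7) (hn : n = 28 ∨ n = 29 ∨ n = 30 ∨ n = 31) :
    (pvChunk7 (List.replicate f.toNat 0 ++ PySem.List.pyRange 1 (n + 1) 1 ++
               List.replicate ((7 - (f + n) % 7) % 7).toNat 0)).map
      (fun week => week.map (fun day => if day = 0 then noop else cell day))
    = (PySem.List.pyRange 0 (PySem.Int.floordiv (f + n + 6) 7) 1).map (fun w =>
        (PySem.List.pyRange (w * 7 - f + 1) (w * 7 - f + 8) 1).map (fun d =>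
          if d < 1 ∨ n < d then noop else cell d)) := by
  interval_cases f <;> rcases hn with rfl | rfl | rfl | rfl <;> rfl

-- ===== VERDICT (by name: the statement is the Claim_ definition above) =====
theorem build_month_grid_rows_py_spec : Claim_equal_build_month_grid_rows_py := by
  intro ym token _ _
  unfold Spec_build_month_grid_rows_py build_month_grid_rows_py build_month_grid_rows_py_alt
  simp only []
  rw [pvMonthDaysCal]
  obtain ⟨h0, h7⟩ := pvFirstWeekday_bounds ym.1 ym.2
  rw [weeks_eq _ _ _ _ h0 h7 (pvNDays_cases ym.1 ym.2)]
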